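-- pv_equiv track=rewrite | github.com/sammhit/Learning-Coding | HackerRankSolutions/lisaWorkbook.py | workbook
-- ===== SOURCE A (Python) =====
-- def workbook(n, k, arr):
--     pageNo = 1
--     special = 0
--     count = 0
--     for i, j in zip(range(1,n+1), arr) :
--
--         for problem in range(1,j+1):
--             count+=1
--
--             if pageNo == problem:
--                 special+=1
--             if count>=k and problem!=j:
--                 pageNo+=1
--                 count=0
--
--
--         pageNo+=1
--         count=0
--     return special
-- ===== SOURCE B (Python) =====
-- def workbook(n, k, arr):
--     special = 0
--     page = 1
--     # a non-positive capacity fills a page after every problem, i.e. it behaves as capacity 1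
--     kk = k if k >= 1 else 1
--     for j in arr[:max(n, 0)]:
--         if j >= 1:
--             if kk == 1:
--                 if page == 1:
--                     special += j
--             else:
--                 lo = max(1, -((-(kk * (page - 1))) // (kk - 1)))
--                 hi = min(j, (kk * page - 1) // (kk - 1))
--                 if lo <= hi:
--                     special += hi - lo + 1
--             page += (j - 1) // kk + 1
--         else:
--             page += 1
--     return special
-- ===== Notes on version B (the rewrite author's own statement) =====
-- stated objective: faster
-- what changed: B replaces A's problem-by-problem simulation with an O(1) closed form per chapter: the special problems of a chapter starting on page P are the contiguous p with p = P + (p-1)//k, computed by ceiling/floor division, and the page counter advances by ceil(j/k) at once (non-positive k is normalized to capacity 1, which is exactly how A's full-page test behaves).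
import Mathlib
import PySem

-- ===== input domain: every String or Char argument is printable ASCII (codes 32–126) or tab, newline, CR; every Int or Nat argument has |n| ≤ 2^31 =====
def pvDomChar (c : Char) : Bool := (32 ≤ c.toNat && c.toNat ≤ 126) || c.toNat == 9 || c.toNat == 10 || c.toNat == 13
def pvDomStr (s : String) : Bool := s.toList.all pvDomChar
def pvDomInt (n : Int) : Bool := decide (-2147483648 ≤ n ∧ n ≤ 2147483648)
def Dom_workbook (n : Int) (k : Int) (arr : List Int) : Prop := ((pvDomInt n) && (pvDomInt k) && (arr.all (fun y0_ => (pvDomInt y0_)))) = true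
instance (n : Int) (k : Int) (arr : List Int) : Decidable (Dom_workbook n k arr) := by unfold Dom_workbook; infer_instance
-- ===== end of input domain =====

-- B replaces A's problem-by-problem simulation (O(sum arr) steps) by an O(1)-per-chapter closed form
-- obtained by algebra on floor division; a non-positive capacity k behaves as capacity 1 in A
-- (the page-full test count >= k fires after every problem), so B normalizes it and is total.

-- ===== PORT A =====
-- inner-loop body of A: one problem
def stepA (k j : Int) (st : Int × Int × Int) (problem : Int) : Int × Int × Int :=
  let pageNo := st.1
  let count := st.2.2 + 1
  let special := if pageNo = problem then st.2.1 + 1 else st.2.1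
  if k ≤ count ∧ problem ≠ j then (pageNo + 1, special, 0) else (pageNo, special, count)

-- outer-loop body of A: one chapter (inner loop over its problems, then page turn and count reset)
def chapA (k : Int) (st : Int × Int × Int) (j : Int) : Int × Int × Int :=
  let st2 := (PySem.List.pyRange 1 (j + 1) 1).foldl (stepA k j) st
  (st2.1 + 1, st2.2.1, 0)

-- 'for i, j in zip(range(1, n+1), arr)': zip consumes the (lazy) range chapter by chapter,
-- pairing chapter j with index i and stopping when either arr or the range runs out
def loopA (k n : Int) : List Int → Int → (Int × Int × Int) → (Int × Int × Int)
  | [], _, st => st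
  | j :: rest, i, st => if i ≤ n then loopA k n rest (i + 1) (chapA k st j) else st

def workbook (n : Int) (k : Int) (arr : List Int) : Int :=
  (loopA k n arr 1 (1, 0, 0)).2.1

-- ===== PORT B =====
-- loop body of B: one chapter in O(1); state = (special, page)
def stepB (kk : Int) (st : Int × Int) (j : Int) : Int × Int :=
  let special := st.1
  let page := st.2
  if 1 ≤ j then
    let special :=
      if kk = 1 then (if page = 1 then special + j else special)
      else
        let lo := max 1 (-(PySem.Int.floordiv (-(kk * (page - 1))) (kk - 1)))
        let hi := min j (PySem.Int.floordiv (kk * page - 1) (kk - 1))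
        if lo ≤ hi then special + (hi - lo + 1) else special
    (special, page + (PySem.Int.floordiv (j - 1) kk + 1))
  else (special, page + 1)

def workbook_alt (n : Int) (k : Int) (arr : List Int) : Int :=
  ((PySem.List.slice arr none (some (max n 0))).foldl (stepB (if 1 ≤ k then k else 1)) (0, 1)).1

-- ===== PRECONDITION & SPEC =====
def Spec_workbook (n : Int) (k : Int) (arr : List Int) (out : Int) : Prop := out = workbook_alt n k arr
instance (n : Int) (k : Int) (arr : List Int) (out : Int) : Decidable (Spec_workbook n k arr out) := by unfold Spec_workbook; infer_instance

-- ===== CLAIM (what is proved, stated in full; the proofs are below) =====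
def Claim_equal_workbook : Prop := ∀ (n : Int) (k : Int) (arr : List Int), Dom_workbook n k arr → Spec_workbook n k arr (workbook n k arr)

-- ===== LEMMAS AND PROOFS =====

-- the condition "problem q is special in a chapter that starts on page P" (A keeps
-- pageNo = P + (q-1)//k when it reaches problem q; proved below as the loop invariant)
def condS (k P q : Int) : Bool := P + PySem.Int.floordiv (q - 1) k = q

-- count of special problems among 1..j of a chapter starting on page P
def cntI (k P j : Int) : Int :=
  ((PySem.List.pyRange 1 (j + 1) 1).countP (fun q => condS k P q) : Int)

lemma fd_one (x : Int) : PySem.Int.floordiv x 1 = x := by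
  rw [PySem.Int.floordiv_eq_iff_of_pos (by omega)]
  omega

lemma stepA_mid (k j P s q : Int) (hqj : q < j) :
    stepA k j (P + PySem.Int.floordiv (q - 1) (max k 1), s, PySem.Int.mod (q - 1) (max k 1)) q
      = (P + PySem.Int.floordiv q (max k 1),
         s + (if condS (max k 1) P q then 1 else 0),
         PySem.Int.mod q (max k 1)) := by
  have hk0 : (0:Int) < max k 1 := by omega
  have hr0 := PySem.Int.mod_nonneg (q - 1) hk0
  have hrk := PySem.Int.mod_lt (q - 1) hk0
  have hdr := PySem.Int.floordiv_mul_add_mod (q - 1) (max k 1)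
  have hdr2 := PySem.Int.floordiv_mul_add_mod q (max k 1)
  set K := max k 1 with hK
  set d := PySem.Int.floordiv (q - 1) K with hd
  set r := PySem.Int.mod (q - 1) K with hr
  have hne : q ≠ j := by omega
  by_cases hfull : k ≤ r + 1
  · -- r = K - 1, page turns
    have hrr : r = K - 1 := by omega
    have hq' : PySem.Int.floordiv q K = d + 1 := by
      rw [PySem.Int.floordiv_eq_iff_of_pos hk0]
      constructor <;> nlinarith
    have hm' : PySem.Int.mod q K = 0 := by nlinarith [hdr2, hq']
    simp [stepA, hne, hfull, hq', hm', condS, ← hd]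
    exact ⟨by ring, by split_ifs <;> ring⟩
  · have hrK : r + 1 < K := by omega
    have hq' : PySem.Int.floordiv q K = d := by
      rw [PySem.Int.floordiv_eq_iff_of_pos hk0]
      constructor <;> nlinarith
    have hm' : PySem.Int.mod q K = r + 1 := by nlinarith [hdr2, hq']
    simp [stepA, hne, hfull, hq', hm', condS, ← hd]
    split_ifs <;> ring

lemma innerA_inv (k j P s : Int) :
    ∀ (m : Nat), (m : Int) ≤ j - 1 →
      (PySem.List.pyRange 1 ((m : Int) + 1) 1).foldl (stepA k j) (P, s, 0)
        = (P + PySem.Int.floordiv (m : Int) (max k 1), s + cntI (max k 1) P (m : Int), PySem.Int.mod (m : Int) (max k 1)) := by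
  intro m
  induction m with
  | zero =>
    intro _
    simp only [Nat.cast_zero]
    rw [PySem.List.pyRange_one_eq_nil (by omega)]
    simp [cntI]
  | succ m ih =>
    intro hm
    push_cast at hm ⊢
    rw [PySem.List.pyRange_one_succ_right (show (1:Int) ≤ (m : Int) + 1 by omega), List.foldl_append]
    rw [ih (by omega)]
    have h1 : ((m : Int) + 1) - 1 = (m : Int) := by ring
    have hst := stepA_mid k j P (s + cntI (max k 1) P (m : Int)) ((m : Int) + 1) (by omega)
    rw [h1] at hst
    simp only [List.foldl_cons, List.foldl_nil]
    rw [hst]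
    have h2 : cntI (max k 1) P ((m : Int) + 1) = cntI (max k 1) P (m : Int) + (if condS (max k 1) P ((m : Int) + 1) then 1 else 0) := by
      unfold cntI
      rw [PySem.List.pyRange_one_succ_right (show (1:Int) ≤ (m : Int) + 1 by omega), List.countP_append]
      split_ifs with h <;> simp [h]
    rw [h2]
    ring_nf

lemma chapA_eq (k j P s : Int) :
    chapA k (P, s, 0) j
      = if 1 ≤ j then (P + (PySem.Int.floordiv (j - 1) (max k 1) + 1), s + cntI (max k 1) P j, 0)
        else (P + 1, s, 0) := by
  by_cases hj : 1 ≤ j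
  · simp only [hj, if_pos]
    obtain ⟨m, hm⟩ : ∃ m : Nat, (m : Int) = j - 1 := ⟨(j - 1).toNat, by omega⟩
    unfold chapA
    rw [show j + 1 = ((m : Int) + 1) + 1 by omega,
        PySem.List.pyRange_one_succ_right (show (1:Int) ≤ (m : Int) + 1 by omega), List.foldl_append,
        innerA_inv k j P s m (by omega)]
    have hstep : stepA k j (P + PySem.Int.floordiv (m : Int) (max k 1), s + cntI (max k 1) P (m : Int), PySem.Int.mod (m : Int) (max k 1)) ((m : Int) + 1)
        = (P + PySem.Int.floordiv (m : Int) (max k 1),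
           s + cntI (max k 1) P (m : Int) + (if condS (max k 1) P ((m : Int) + 1) then 1 else 0),
           PySem.Int.mod (m : Int) (max k 1) + 1) := by
      unfold stepA
      have hji : ((m : Int) + 1) = j := by omega
      rw [if_neg (by simp [hji])]
      simp only [condS, show (m : Int) + 1 - 1 = (m : Int) by ring, decide_eq_true_eq]
      split_ifs <;> simp
    simp only [List.foldl_cons, List.foldl_nil]
    rw [hstep]
    have h2 : cntI (max k 1) P j = cntI (max k 1) P (m : Int) + (if condS (max k 1) P ((m : Int) + 1) then 1 else 0) := by
      unfold cntI
      rw [show j + 1 = ((m : Int) + 1) + 1 by omega,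
          PySem.List.pyRange_one_succ_right (show (1:Int) ≤ (m : Int) + 1 by omega), List.countP_append]
      split_ifs with h <;> simp [h]
    rw [h2, show (m : Int) = j - 1 from hm]
    ring_nf
  · rw [if_neg hj]
    unfold chapA
    rw [PySem.List.pyRange_one_eq_nil (by omega)]
    simp

lemma cntI_one (P j : Int) (hj : 1 ≤ j) :
    cntI 1 P j = if P = 1 then j else 0 := by
  unfold cntI
  have hc : ∀ q : Int, condS 1 P q = true ↔ P = 1 := by
    intro q; unfold condS; rw [fd_one]; simp; omega
  by_cases hP : P = 1
  · rw [if_pos hP]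
    rw [List.countP_congr (q := fun _ => true) (fun x _ => by subst hP; simp [hc x])]
    simp [List.countP_true, PySem.List.length_pyRange_one]
    omega
  · rw [if_neg hP]
    rw [List.countP_congr (q := fun _ => false) (fun x _ => by simp [hc x, hP])]
    simp

lemma condS_iff (k P q : Int) (hk : 2 ≤ k) :
    condS k P q = true ↔
      (-(PySem.Int.floordiv (-(k * (P - 1))) (k - 1)) ≤ q ∧ q ≤ PySem.Int.floordiv (k * P - 1) (k - 1)) := by
  have hk0 : (0:Int) < k := by omega
  have hk1 : (0:Int) < k - 1 := by omega
  have hcond : condS k P q = true ↔ ((q - P) * k ≤ q - 1 ∧ q - 1 < (q - P + 1) * k) := by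
    unfold condS
    rw [decide_eq_true_eq]
    constructor
    · intro h
      have : PySem.Int.floordiv (q - 1) k = q - P := by omega
      rw [PySem.Int.floordiv_eq_iff_of_pos hk0] at this
      omega
    · intro h
      have : PySem.Int.floordiv (q - 1) k = q - P := by
        rw [PySem.Int.floordiv_eq_iff_of_pos hk0]; omega
      omega
  have hlo : (-(PySem.Int.floordiv (-(k * (P - 1))) (k - 1)) ≤ q) ↔ ((-q) * (k - 1) ≤ -(k * (P - 1))) := by
    rw [neg_le, PySem.Int.le_floordiv_iff_mul_le hk1]
  have hhi : (q ≤ PySem.Int.floordiv (k * P - 1) (k - 1)) ↔ (q * (k - 1) ≤ k * P - 1) := by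
    rw [PySem.Int.le_floordiv_iff_mul_le hk1]
  rw [hcond, hlo, hhi]
  obtain ⟨a, ha⟩ : ∃ a, q * k = a := ⟨_, rfl⟩
  obtain ⟨b, hb⟩ : ∃ b, P * k = b := ⟨_, rfl⟩
  have r1 : (q - P) * k = a - b := by rw [← ha, ← hb]; ring
  have r2 : (q - P + 1) * k = a - b + k := by rw [← ha, ← hb]; ring
  have r3 : (-q) * (k - 1) = -a + q := by rw [← ha]; ring
  have r4 : -(k * (P - 1)) = -b + k := by rw [← hb]; ring
  have r5 : q * (k - 1) = a - q := by rw [← ha]; ring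
  have r6 : k * P - 1 = b - 1 := by rw [← hb]; ring
  rw [r1, r2, r3, r4, r5, r6]
  omega

lemma countP_interval (lo hi : Int) :
    ∀ (m : Nat),
      (((PySem.List.pyRange 1 ((m : Int) + 1) 1).countP (fun q => decide (lo ≤ q ∧ q ≤ hi)) : Int))
        = if max 1 lo ≤ min (m : Int) hi then min (m : Int) hi - max 1 lo + 1 else 0 := by
  intro m
  induction m with
  | zero =>
    simp only [Nat.cast_zero, zero_add]
    rw [PySem.List.pyRange_one_eq_nil (by omega)]
    rw [if_neg (by omega)]
    simp
  | succ m ih =>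
    push_cast
    rw [PySem.List.pyRange_one_succ_right (show (1:Int) ≤ (m : Int) + 1 by omega), List.countP_append]
    push_cast
    rw [ih]
    by_cases hc : lo ≤ (m : Int) + 1 ∧ (m : Int) + 1 ≤ hi
    · simp [hc]
      omega
    · have hb : (decide (lo ≤ (m : Int) + 1 ∧ (m : Int) + 1 ≤ hi)) = false := by
        simp only [decide_eq_false_iff_not]; exact hc
      simp only [List.countP_cons, List.countP_nil, hb, Bool.false_eq_true, if_false, Nat.cast_zero, add_zero]
      split_ifs <;> omega

lemma cntI_closed (k P j : Int) (hk : 2 ≤ k) (hj : 1 ≤ j) :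
    cntI k P j =
      (if max 1 (-(PySem.Int.floordiv (-(k * (P - 1))) (k - 1)))
          ≤ min j (PySem.Int.floordiv (k * P - 1) (k - 1))
       then min j (PySem.Int.floordiv (k * P - 1) (k - 1))
            - max 1 (-(PySem.Int.floordiv (-(k * (P - 1))) (k - 1))) + 1
       else 0) := by
  obtain ⟨m, hm⟩ : ∃ m : Nat, (m : Int) = j := ⟨j.toNat, by omega⟩
  unfold cntI
  rw [List.countP_congr
        (q := fun x => decide (-(PySem.Int.floordiv (-(k * (P - 1))) (k - 1)) ≤ x
                        ∧ x ≤ PySem.Int.floordiv (k * P - 1) (k - 1)))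
        (fun x _ => by rw [condS_iff k P x hk, decide_eq_true_eq])]
  rw [← hm]
  exact countP_interval _ _ m

lemma stepB_eq (kk j P s : Int) (hk : 1 ≤ kk) :
    stepB kk (s, P) j
      = if 1 ≤ j then (s + cntI kk P j, P + (PySem.Int.floordiv (j - 1) kk + 1))
        else (s, P + 1) := by
  by_cases hj : 1 ≤ j
  · rw [if_pos hj]
    unfold stepB
    rw [if_pos hj]
    by_cases hk1 : kk = 1
    · subst hk1
      rw [cntI_one P j hj, if_pos rfl]
      split_ifs <;> simp
    · have hk2 : 2 ≤ kk := by omega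
      rw [cntI_closed kk P j hk2 hj]
      simp only [if_neg hk1]
      split_ifs with h
      · simp
      · simp
  · rw [if_neg hj]
    unfold stepB
    rw [if_neg hj]

lemma fold_corr (k : Int) :
    ∀ (cs : List Int) (P s : Int),
      cs.foldl (chapA k) (P, s, 0)
        = ((cs.foldl (stepB (max k 1)) (s, P)).2, (cs.foldl (stepB (max k 1)) (s, P)).1, 0) := by
  intro cs
  induction cs with
  | nil => intro P s; simp
  | cons j t ih =>
    intro P s
    simp only [List.foldl_cons]
    rw [chapA_eq k j P s, stepB_eq (max k 1) j P s (by omega)]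
    by_cases hj : 1 ≤ j
    · rw [if_pos hj, if_pos hj, ih]
    · rw [if_neg hj, if_neg hj, ih]

lemma loopA_eq_foldl_take (k n : Int) :
    ∀ (arr : List Int) (i : Int) (st : Int × Int × Int),
      loopA k n arr i st = (arr.take (n - i + 1).toNat).foldl (chapA k) st := by
  intro arr
  induction arr with
  | nil => intro i st; simp [loopA]
  | cons j rest ih =>
    intro i st
    unfold loopA
    by_cases hi : i ≤ n
    · rw [if_pos hi, ih (i + 1) (chapA k st j),
          show (n - i + 1).toNat = (n - (i + 1) + 1).toNat + 1 by omega]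
      simp [List.take_succ_cons]
    · rw [if_neg hi, show (n - i + 1).toNat = 0 by omega]
      simp

-- ===== VERDICT (by name: the statement is the Claim_ definition above) =====
theorem workbook_spec : Claim_equal_workbook := by
  intro n k arr _
  unfold Spec_workbook workbook workbook_alt
  rw [loopA_eq_foldl_take k n arr 1 (1, 0, 0),
      PySem.List.slice_to arr (by omega : (0:Int) ≤ max n 0),
      show (n - 1 + 1).toNat = (max n 0).toNat by omega,
      fold_corr k, show (if 1 ≤ k then k else 1) = max k 1 by split_ifs <;> omega]
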